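-- pv_equiv track=rewrite | github.com/vuniem131104/Multiple-Choice-Question-Generation-With-LLMs-and-KG | services/indexing/src/indexing/domain/chunker/service.py | _remove_bottom_header
-- ===== SOURCE A (Python) =====
-- def _remove_bottom_header(chunks: list[list[str]], file_name: str) -> list[list[str]]:
--     """Removes the header from the bottom of each chunk if it is present.
--
--     Args:
--         chunks (list[list[str]]): The list of chunks to process.
--         file_name (str): The name of the file to be added at the top of each chunk.
--
--     Returns:
--         list[list[str]]: The processed list of chunks with headers removed from the bottom.
--     """
--     file_name_text: str = f'**{file_name}**\n'
--     for chunk_index, chunk in enumerate(chunks):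
--         if not chunk:
--             continue
--         end_index: int = len(chunk)
--         for line_index in range(-1, -len(chunk) - 1, -1):
--             if chunk[line_index].strip().startswith('#') or chunk[line_index].strip() == '':
--                 end_index = line_index
--                 continue
--             else:
--                 break
--         chunks[chunk_index] = chunks[chunk_index][:end_index]
--         # add file name at the top of the chunk
--         if chunks[chunk_index]:  # More pythonic than != []
--             chunks[chunk_index].insert(0, file_name_text)
--     return chunks
-- ===== SOURCE B (Python) =====
-- def _remove_bottom_header(chunks: list[list[str]], file_name: str) -> list[list[str]]:
--     """Forward one-pass variant: track the index just past the last significant line."""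
--     file_name_text: str = f'**{file_name}**\n'
--     for chunk_index, chunk in enumerate(chunks):
--         cut = 0
--         for i, line in enumerate(chunk):
--             stripped = line.strip()
--             if not (stripped.startswith('#') or stripped == ''):
--                 cut = i + 1
--         trimmed = chunk[:cut]
--         chunks[chunk_index] = [file_name_text] + trimmed if trimmed else trimmed
--     return chunks
-- ===== Notes on version B (the rewrite author's own statement) =====
-- stated objective: alternative
-- what changed: Replaces the bottom-up negative-index scan with early break (and its separate empty-chunk guard) by a single forward pass that tracks cut = last-significant-line index + 1 and slices the chunk to that prefix.
import Mathlib
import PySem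

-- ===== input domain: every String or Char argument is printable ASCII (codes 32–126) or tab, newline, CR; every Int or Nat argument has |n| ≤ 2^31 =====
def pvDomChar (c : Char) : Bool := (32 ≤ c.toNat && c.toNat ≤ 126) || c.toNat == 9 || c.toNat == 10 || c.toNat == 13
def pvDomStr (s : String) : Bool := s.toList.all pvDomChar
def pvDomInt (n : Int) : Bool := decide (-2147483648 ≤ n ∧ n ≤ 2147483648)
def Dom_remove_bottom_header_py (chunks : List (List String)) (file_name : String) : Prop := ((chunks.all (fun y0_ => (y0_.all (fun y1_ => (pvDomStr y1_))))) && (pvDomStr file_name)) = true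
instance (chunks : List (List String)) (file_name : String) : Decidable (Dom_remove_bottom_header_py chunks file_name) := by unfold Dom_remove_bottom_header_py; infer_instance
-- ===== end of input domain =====

-- B replaces A's bottom-up negative-index scan (with early break and empty-chunk guard) by a
-- single forward pass tracking the cutoff after the last significant line; equivalence is about
-- the RETURN value (both Pythons also rewrite the list `chunks` in place, entry by entry).

-- ===== PORT A =====
-- inner loop: for line_index in range(-1, -len(chunk) - 1, -1): … continue / break
def pvALoop (chunk : List String) : List Int → Int → Int
  | [], e => e
  | i :: rest, e =>
    match PySem.List.pyGet? chunk i with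
    | some line =>
        if PySem.Str.startswith (PySem.Str.strip line) "#" || PySem.Str.strip line == "" then
          pvALoop chunk rest i          -- end_index = line_index; continue
        else e                          -- break
    | none => e                         -- unreachable: every generated index is in range

-- body of A's outer loop for one chunk (each iteration touches only its own list entry)
def pvAChunk (file_name_text : String) (chunk : List String) : List String :=
  if chunk = [] then chunk              -- continue
  else
    let e := pvALoop chunk
      (PySem.List.pyRange (-1) (-(PySem.List.len chunk) - 1) (-1)) (PySem.List.len chunk)
    let c := PySem.List.slice chunk none (some e)   -- chunks[chunk_index][:end_index]
    if c = [] then c else file_name_text :: c       -- insert(0, file_name_text) if non-empty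

def remove_bottom_header_py (chunks : List (List String)) (file_name : String) : List (List String) :=
  chunks.map (pvAChunk ("**" ++ file_name ++ "**\n"))

-- ===== PORT B =====
-- body of B's outer loop for one chunk: forward pass computing cut, then slice and prepend
def pvBChunk (file_name_text : String) (chunk : List String) : List String :=
  let cut : Int := (PySem.List.enumerate chunk 0).foldl
    (fun c p =>
      if !(PySem.Str.startswith (PySem.Str.strip p.2) "#" || PySem.Str.strip p.2 == "") then p.1 + 1
      else c) 0
  let trimmed := PySem.List.slice chunk none (some cut)   -- chunk[:cut]
  if trimmed = [] then trimmed else file_name_text :: trimmed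

def remove_bottom_header_py_alt (chunks : List (List String)) (file_name : String) : List (List String) :=
  chunks.map (pvBChunk ("**" ++ file_name ++ "**\n"))

-- ===== PRECONDITION & SPEC =====
def Spec_remove_bottom_header_py (chunks : List (List String)) (file_name : String) (out : List (List String)) : Prop := out = remove_bottom_header_py_alt chunks file_name
instance (chunks : List (List String)) (file_name : String) (out : List (List String)) : Decidable (Spec_remove_bottom_header_py chunks file_name out) := by unfold Spec_remove_bottom_header_py; infer_instance

-- ===== CLAIM (what is proved, stated in full; the proofs are below) =====
def Claim_equal_remove_bottom_header_py : Prop := ∀ (chunks : List (List String)) (file_name : String), Dom_remove_bottom_header_py chunks file_name → Spec_remove_bottom_header_py chunks file_name (remove_bottom_header_py chunks file_name)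

-- ===== LEMMAS AND PROOFS =====

def pvInsig (s : String) : Bool :=
  PySem.Str.startswith (PySem.Str.strip s) "#" || PySem.Str.strip s == ""

def pvT (chunk : List String) : Nat := (chunk.reverse.takeWhile pvInsig).length

lemma pvT_append_pos (ws : List String) (y : String) (h : pvInsig y = true) :
    pvT (ws ++ [y]) = pvT ws + 1 := by
  simp [pvT, h]

lemma pvT_append_neg (ws : List String) (y : String) (h : pvInsig y = false) :
    pvT (ws ++ [y]) = 0 := by
  simp [pvT, h]

set_option maxHeartbeats 1000000 in
lemma pvALoop_char (zs : List String) : ∀ (suffix : List String) (e : Int),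
    pvALoop (zs ++ suffix)
      (PySem.List.pyRange (-1 - (suffix.length : Int))
        (-1 - (suffix.length : Int) - (zs.length : Int)) (-1)) e
    = if pvT zs = 0 then e else -(pvT zs : Int) - (suffix.length : Int) := by
  induction zs using List.reverseRecOn with
  | nil =>
      intro suffix e
      rw [PySem.List.pyRange_neg_one_eq_nil (by simp)]
      simp [pvALoop, pvT]
  | append_singleton ws y ih =>
      intro suffix e
      rw [PySem.List.pyRange_neg_one_cons
        (by simp only [List.length_append, List.length_cons, List.length_nil]; push_cast; omega)]
      have hget : PySem.List.pyGet? (ws ++ [y] ++ suffix) (-1 - (suffix.length : Int))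
          = some y := by
        have h1 : (-1 - (suffix.length : Int)) = -(((suffix.length + 1 : Nat)) : Int) := by
          push_cast; ring
        rw [h1, PySem.List.pyGet?_neg_natCast (ws ++ [y] ++ suffix) (suffix.length + 1)
          (by omega) (by simp)]
        have h2 : (ws ++ [y] ++ suffix).length - (suffix.length + 1) = ws.length := by
          simp
        rw [h2, List.append_assoc, List.getElem?_append_right (by omega)]
        simp
      simp only [pvALoop, hget]
      by_cases hy : pvInsig y = true
      · have hy' : (PySem.Str.startswith (PySem.Str.strip y) "#" || PySem.Str.strip y == "") = true := hy
        rw [hy']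
        have e2 : (-1 - (suffix.length : Int) - (((ws ++ [y]).length : Nat) : Int))
            = (-1 - (((y :: suffix).length : Nat) : Int) - ((ws.length : Nat) : Int)) := by
          simp only [List.length_append, List.length_cons, List.length_nil]
          push_cast; ring
        have e1 : (-1 - (suffix.length : Int) - 1)
            = (-1 - (((y :: suffix).length : Nat) : Int)) := by
          simp only [List.length_cons]
          push_cast; ring
        have hlist : ws ++ [y] ++ suffix = ws ++ (y :: suffix) := by simp
        rw [e2, e1, hlist, ih (y :: suffix) (-1 - (suffix.length : Int))]
        rw [pvT_append_pos ws y hy]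
        by_cases ht : pvT ws = 0 <;> simp [ht] <;> push_cast <;> omega
      · have hy' : (PySem.Str.startswith (PySem.Str.strip y) "#" || PySem.Str.strip y == "") = false := by
          simpa [pvInsig] using hy
        rw [hy']
        rw [pvT_append_neg ws y (by simpa using hy)]
        simp

lemma pvT_le (chunk : List String) : pvT chunk ≤ chunk.length := by
  unfold pvT
  rw [← List.length_reverse (as := chunk)]
  generalize chunk.reverse = l
  induction l with
  | nil => simp
  | cons x xs ih => by_cases h : pvInsig x <;> simp [h] <;> omega

lemma pvA_trim (chunk : List String) :
    PySem.List.slice chunk none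
      (some (pvALoop chunk
        (PySem.List.pyRange (-1) (-(PySem.List.len chunk) - 1) (-1)) (PySem.List.len chunk)))
    = chunk.take (chunk.length - pvT chunk) := by
  have hzs := pvALoop_char chunk [] ((chunk.length : Int))
  simp only [List.append_nil, List.length_nil, Nat.cast_zero, sub_zero] at hzs
  rw [PySem.List.len_eq]
  have e1 : (-(chunk.length : Int) - 1) = (-1 - (chunk.length : Int)) := by ring
  rw [e1, hzs]
  by_cases ht : pvT chunk = 0
  · rw [if_pos ht, PySem.List.slice_to_natCast, ht]
    simp
  · rw [if_neg ht]
    rw [PySem.List.slice_to_neg_natCast chunk (pvT chunk) (by omega)]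

lemma pvB_cut (chunk : List String) :
    (PySem.List.enumerate chunk 0).foldl
      (fun c p =>
        if !(PySem.Str.startswith (PySem.Str.strip p.2) "#" || PySem.Str.strip p.2 == "") then p.1 + 1
        else c) 0
    = (((chunk.length - pvT chunk : Nat)) : Int) := by
  induction chunk using List.reverseRecOn with
  | nil => simp [pvT]
  | append_singleton ws y ih =>
      rw [PySem.List.enumerate_append, List.foldl_append, ih,
        PySem.List.enumerate_cons, PySem.List.enumerate_nil]
      simp only [List.foldl_cons, List.foldl_nil]
      by_cases hy : pvInsig y = true
      · have hy' : (PySem.Str.startswith (PySem.Str.strip y) "#" || PySem.Str.strip y == "") = true := hy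
        rw [pvT_append_pos ws y hy]
        have hle := pvT_le ws
        simp only [hy', Bool.not_true]
        norm_num
        omega
      · have hy' : (PySem.Str.startswith (PySem.Str.strip y) "#" || PySem.Str.strip y == "") = false := by
          simpa [pvInsig] using hy
        rw [pvT_append_neg ws y (by simpa using hy)]
        simp only [hy', Bool.not_false]
        norm_num

lemma pvChunk_eq (txt : String) (chunk : List String) :
    pvAChunk txt chunk = pvBChunk txt chunk := by
  by_cases h : chunk = []
  · subst h; rfl
  · simp only [pvAChunk, pvBChunk, if_neg h]
    rw [pvA_trim chunk, pvB_cut chunk, PySem.List.slice_to_natCast]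

-- ===== VERDICT (by name: the statement is the Claim_ definition above) =====
theorem remove_bottom_header_py_spec : Claim_equal_remove_bottom_header_py := by
  intro chunks file_name _
  unfold Spec_remove_bottom_header_py remove_bottom_header_py remove_bottom_header_py_alt
  exact List.map_congr_left (fun c _ => pvChunk_eq _ c)
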